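-- pv_equiv track=rewrite | github.com/pan-0/aoc | y15/d17b.py | crunch
-- ===== SOURCE A (Python) =====
-- from itertools import dropwhile, takewhile
--
-- def crunch(buckets: list[int], index: int, alloted: int, used: int) -> list:
--     if alloted == 0:
--         yield used
--     else:
--         indices = dropwhile(lambda i: buckets[i] > alloted,
--                             range(index, len(buckets)))
--         for i in takewhile(lambda i: buckets[i] <= alloted, indices):
--             yield from crunch(buckets, i + 1, alloted - buckets[i], used + 1)
-- ===== SOURCE B (Python) =====
-- def crunch(buckets, index, alloted, used):
--     # Iterative DFS with an explicit frame stack instead of recursive generators;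
--     # returns the same yield sequence as a list.
--     n = len(buckets)
--     out = []
--     stack = [(index, alloted, used)]
--     while stack:
--         i, a, u = stack.pop()
--         if a == 0:
--             out.append(u)
--             continue
--         j = i
--         while j < n and buckets[j] > a:       # dropwhile: skip leading too-big buckets
--             j += 1
--         run = []
--         while j < n and buckets[j] <= a:      # takewhile: first contiguous fitting run
--             run.append((j + 1, a - buckets[j], u + 1))
--             j += 1
--         stack.extend(reversed(run))           # leftmost child on top -> preorder
--     return out
-- ===== Notes on version B (the rewrite author's own statement) =====
-- stated objective: alternative
-- what changed: The recursive generator is replaced by an iterative DFS over an explicit stack of (index, alloted, used) frames, pushing each node's first contiguous run of fitting child frames in reverse so the preorder yield sequence is preserved.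
import Mathlib
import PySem

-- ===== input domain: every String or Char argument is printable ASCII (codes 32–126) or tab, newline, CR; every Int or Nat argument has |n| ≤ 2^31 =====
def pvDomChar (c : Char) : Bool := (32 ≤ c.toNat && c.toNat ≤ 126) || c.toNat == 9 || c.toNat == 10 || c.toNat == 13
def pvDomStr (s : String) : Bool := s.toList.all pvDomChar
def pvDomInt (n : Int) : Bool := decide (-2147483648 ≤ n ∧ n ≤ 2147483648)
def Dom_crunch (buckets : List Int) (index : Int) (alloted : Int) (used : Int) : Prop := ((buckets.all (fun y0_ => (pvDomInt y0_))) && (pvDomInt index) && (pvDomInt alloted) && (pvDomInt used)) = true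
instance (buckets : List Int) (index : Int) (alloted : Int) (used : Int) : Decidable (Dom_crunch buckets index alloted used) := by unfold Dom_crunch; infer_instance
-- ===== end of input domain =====

-- B replaces A's recursive generator by an iterative DFS over an explicit stack of frames (alternative decomposition, same cost).
-- A is a generator; both ports return the list of yielded values. Fuel arguments are pure totality guards
-- (each is chosen large enough that the 0 case is never reached); buckets[i] is ported as PySem.List.pyGetD … 0,
-- exact on Pre_ (every evaluated index is then in range, after Python's negative-index wraparound).

-- ===== PORT A =====
def crunchF (fuel : Nat) (buckets : List Int) (index : Int) (alloted : Int) (used : Int) : List Int :=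
  match fuel with
  | 0 => []
  | fuel + 1 =>
    if alloted = 0 then [used]
    else
      (((PySem.List.pyRange index buckets.length 1).dropWhile
            (fun i => decide (PySem.List.pyGetD buckets i 0 > alloted))).takeWhile
          (fun i => decide (PySem.List.pyGetD buckets i 0 ≤ alloted))).flatMap
        (fun i => crunchF fuel buckets (i + 1) (alloted - PySem.List.pyGetD buckets i 0) (used + 1))

def crunch (buckets : List Int) (index : Int) (alloted : Int) (used : Int) : List Int :=
  crunchF (((buckets.length : Int) - index).toNat + 1) buckets index alloted used

-- ===== PORT B =====
-- B's first while loop: skip leading indices with buckets[j] > a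
def crunchSkipF (fuel : Nat) (buckets : List Int) (a : Int) (j : Int) : Int :=
  match fuel with
  | 0 => j
  | fuel + 1 =>
    if j < (buckets.length : Int) ∧ PySem.List.pyGetD buckets j 0 > a then
      crunchSkipF fuel buckets a (j + 1)
    else j

-- B's second while loop: collect the first contiguous run of fitting indices as child frames
def crunchRunF (fuel : Nat) (buckets : List Int) (a : Int) (u : Int) (j : Int) : List (Int × Int × Int) :=
  match fuel with
  | 0 => []
  | fuel + 1 =>
    if j < (buckets.length : Int) ∧ PySem.List.pyGetD buckets j 0 ≤ a then
      (j + 1, a - PySem.List.pyGetD buckets j 0, u + 1) :: crunchRunF fuel buckets a u (j + 1)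
    else []

-- frame weight / stack weight: an upper bound on the number of loop iterations, used as the loop's fuel
def crunchWt (buckets : List Int) (i : Int) : Nat := 2 ^ (((buckets.length : Int) + 1 - i).toNat)
def crunchWts (buckets : List Int) (st : List (Int × Int × Int)) : Nat :=
  st.foldr (fun f acc => crunchWt buckets f.1 + acc) 0

-- B's main loop: pop the top frame; yield, or push the frame's children (leftmost on top)
def crunchLoopF (fuel : Nat) (buckets : List Int) (stack : List (Int × Int × Int)) (out : List Int) : List Int :=
  match fuel with
  | 0 => out
  | fuel + 1 =>
    match stack with
    | [] => out
    | (i, a, u) :: rest =>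
      if a = 0 then crunchLoopF fuel buckets rest (out ++ [u])
      else
        let j := crunchSkipF (((buckets.length : Int) - i).toNat + 1) buckets a i
        crunchLoopF fuel buckets
          (crunchRunF (((buckets.length : Int) - j).toNat + 1) buckets a u j ++ rest) out

def crunch_alt (buckets : List Int) (index : Int) (alloted : Int) (used : Int) : List Int :=
  crunchLoopF (crunchWts buckets [(index, alloted, used)]) buckets [(index, alloted, used)] []

-- ===== PRECONDITION & SPEC =====
-- Pre_ excludes exactly the inputs where Python A raises IndexError: alloted ≠ 0 with index below -len(buckets)
-- (the first evaluated buckets[index] is out of range even after negative-index wraparound).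
def Pre_crunch (buckets : List Int) (index : Int) (alloted : Int) (used : Int) : Prop :=
  alloted = 0 ∨ -(buckets.length : Int) ≤ index
instance (buckets : List Int) (index : Int) (alloted : Int) (used : Int) : Decidable (Pre_crunch buckets index alloted used) := by unfold Pre_crunch; infer_instance

def pvWitness_crunch : List Int × Int × Int × Int := ([3, 1, 2, 1], 0, 4, 0)

def Spec_crunch (buckets : List Int) (index : Int) (alloted : Int) (used : Int) (out : List Int) : Prop := out = crunch_alt buckets index alloted used
instance (buckets : List Int) (index : Int) (alloted : Int) (used : Int) (out : List Int) : Decidable (Spec_crunch buckets index alloted used out) := by unfold Spec_crunch; infer_instance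

-- ===== CLAIM (what is proved, stated in full; the proofs are below) =====
def Claim_equal_crunch : Prop := ∀ (buckets : List Int) (index : Int) (alloted : Int) (used : Int), Dom_crunch buckets index alloted used → Pre_crunch buckets index alloted used → Spec_crunch buckets index alloted used (crunch buckets index alloted used)

-- ===== LEMMAS AND PROOFS =====

-- generic congruence for flatMap (pointwise on members)
theorem flatMap_congr_mem {α β : Type} (xs : List α) (f g : α → List β)
    (h : ∀ x ∈ xs, f x = g x) : xs.flatMap f = xs.flatMap g := by
  induction xs with
  | nil => rfl
  | cons x xs ih =>
    rw [List.flatMap_cons, List.flatMap_cons, h x (by simp), ih (fun y hy => h y (by simp [hy]))]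

-- members of A's index run lie between index and len(buckets)
theorem mem_idxs_bounds (buckets : List Int) (index a : Int) (i : Int)
    (h : i ∈ ((PySem.List.pyRange index buckets.length 1).dropWhile
            (fun i => decide (PySem.List.pyGetD buckets i 0 > a))).takeWhile
          (fun i => decide (PySem.List.pyGetD buckets i 0 ≤ a))) :
    index ≤ i ∧ i < (buckets.length : Int) :=
  (PySem.List.mem_pyRange_one).mp
    ((List.dropWhile_sublist _).subset ((List.takeWhile_sublist _).subset h))

-- the fuel guard is inert: any two sufficient fuels give the same value
theorem crunchF_fuel_irrel (fuel : Nat) : ∀ (fuel' : Nat) (buckets : List Int) (index a u : Int),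
    ((buckets.length : Int) - index).toNat < fuel → ((buckets.length : Int) - index).toNat < fuel' →
    crunchF fuel buckets index a u = crunchF fuel' buckets index a u := by
  induction fuel with
  | zero => omega
  | succ fuel ih =>
    intro fuel' buckets index a u hf hf'
    match fuel', hf' with
    | fuel' + 1, _ =>
      simp only [crunchF]
      split
      · rfl
      · apply flatMap_congr_mem
        intro i hi
        have hb := mem_idxs_bounds buckets index a i hi
        exact ih fuel' buckets (i + 1) _ _ (by omega) (by omega)

-- B's skip loop computes A's dropwhile over the index range (with sufficient fuel)
theorem skipF_eq_dropWhile (fuel : Nat) : ∀ (buckets : List Int) (a j : Int),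
    ((buckets.length : Int) - j).toNat < fuel →
    (PySem.List.pyRange j buckets.length 1).dropWhile
        (fun i => decide (PySem.List.pyGetD buckets i 0 > a))
      = PySem.List.pyRange (crunchSkipF fuel buckets a j) buckets.length 1 := by
  induction fuel with
  | zero => omega
  | succ fuel ih =>
    intro buckets a j hf
    simp only [crunchSkipF]
    split
    next h =>
      rw [PySem.List.pyRange_one_cons h.1]
      rw [List.dropWhile_cons_of_pos (by simpa using h.2)]
      exact ih buckets a (j + 1) (by omega)
    next h =>
      rcases lt_or_ge j (buckets.length : Int) with hj | hj
      · rw [PySem.List.pyRange_one_cons hj]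
        rw [List.dropWhile_cons_of_neg (by simp; omega)]
      · rw [PySem.List.pyRange_one_eq_nil hj]
        simp

-- B's run loop computes A's takewhile, paired with the child-frame construction (with sufficient fuel)
theorem runF_eq_takeWhile (fuel : Nat) : ∀ (buckets : List Int) (a u j : Int),
    ((buckets.length : Int) - j).toNat < fuel →
    crunchRunF fuel buckets a u j
      = ((PySem.List.pyRange j buckets.length 1).takeWhile
          (fun i => decide (PySem.List.pyGetD buckets i 0 ≤ a))).map
          (fun i => (i + 1, a - PySem.List.pyGetD buckets i 0, u + 1)) := by
  induction fuel with
  | zero => omega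
  | succ fuel ih =>
    intro buckets a u j hf
    simp only [crunchRunF]
    split
    next h =>
      rw [PySem.List.pyRange_one_cons h.1]
      rw [List.takeWhile_cons_of_pos (by simpa using h.2)]
      simp only [List.map_cons]
      rw [ih buckets a u (j + 1) (by omega)]
    next h =>
      rcases lt_or_ge j (buckets.length : Int) with hj | hj
      · rw [PySem.List.pyRange_one_cons hj]
        rw [List.takeWhile_cons_of_neg (by simp; omega)]
        simp
      · rw [PySem.List.pyRange_one_eq_nil hj]
        simp

-- the skip loop never moves left
theorem skipF_le (fuel : Nat) : ∀ (buckets : List Int) (a j : Int), j ≤ crunchSkipF fuel buckets a j := by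
  induction fuel with
  | zero => intro _ _ _; simp [crunchSkipF]
  | succ fuel ih =>
    intro buckets a j
    simp only [crunchSkipF]
    split
    · have := ih buckets a (j + 1); omega
    · omega

theorem crunchWts_append (buckets : List Int) (xs ys : List (Int × Int × Int)) :
    crunchWts buckets (xs ++ ys) = crunchWts buckets xs + crunchWts buckets ys := by
  induction xs with
  | nil => simp [crunchWts]
  | cons x xs ih => simp only [crunchWts, List.foldr, List.cons_append] at *; omega

-- the weight of the run's child frames is strictly below the parent frame's weight
theorem runF_wts (fuel : Nat) : ∀ (buckets : List Int) (a u j : Int),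
    crunchWts buckets (crunchRunF fuel buckets a u j) < crunchWt buckets j := by
  induction fuel with
  | zero => intro _ _ _ _; simp [crunchRunF, crunchWts, crunchWt]
  | succ fuel ih =>
    intro buckets a u j
    simp only [crunchRunF]
    split
    next h =>
      have := ih buckets a u (j + 1)
      simp only [crunchWts, List.foldr] at *
      have hw : crunchWt buckets (j + 1) * 2 = crunchWt buckets j := by
        simp only [crunchWt]
        have : (((buckets.length : Int) + 1 - j).toNat) = (((buckets.length : Int) + 1 - (j + 1)).toNat) + 1 := by
          omega
        rw [this, pow_succ]
      omega
    next h =>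
      simp [crunchWts, crunchWt]

-- one expansion step of A's recursion equals the child frames B pushes, flat-mapped by A
theorem crunch_step (buckets : List Int) (i a u : Int) (ha : a ≠ 0) :
    (crunchRunF (((buckets.length : Int) - crunchSkipF (((buckets.length : Int) - i).toNat + 1) buckets a i).toNat + 1)
        buckets a u (crunchSkipF (((buckets.length : Int) - i).toNat + 1) buckets a i)).flatMap
        (fun f => crunch buckets f.1 f.2.1 f.2.2)
      = crunch buckets i a u := by
  conv_rhs => rw [crunch]
  rw [runF_eq_takeWhile _ buckets a u _ (by omega),
      ← skipF_eq_dropWhile _ buckets a i (by omega)]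
  simp only [crunchF, if_neg ha, List.flatMap_map]
  apply flatMap_congr_mem
  intro x hx
  have hb := mem_idxs_bounds buckets i a x hx
  show crunch buckets (x + 1) (a - PySem.List.pyGetD buckets x 0) (u + 1) = _
  rw [crunch]
  exact crunchF_fuel_irrel _ _ buckets (x + 1) _ _ (by omega) (by omega)

-- every frame has positive weight
theorem crunchWts_cons_pos (buckets : List Int) (f : Int × Int × Int) (rest : List (Int × Int × Int)) :
    0 < crunchWts buckets (f :: rest) := by
  simp only [crunchWts, List.foldr, crunchWt]
  have h2 : (0:Nat) < 2 ^ (((buckets.length : Int) + 1 - f.1).toNat) := by positivity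
  omega

-- the loop invariant: with fuel at least the stack weight, B's DFS emits, after out,
-- the concatenation of A's results over all frames
theorem crunchLoopF_eq (fuel : Nat) : ∀ (buckets : List Int) (stack : List (Int × Int × Int)) (out : List Int),
    crunchWts buckets stack ≤ fuel →
    crunchLoopF fuel buckets stack out
      = out ++ stack.flatMap (fun f => crunch buckets f.1 f.2.1 f.2.2) := by
  induction fuel with
  | zero =>
    intro buckets stack out hf
    match stack with
    | [] => simp [crunchLoopF]
    | f :: rest => exact absurd hf (by have := crunchWts_cons_pos buckets f rest; omega)
  | succ fuel ih =>
    intro buckets stack out hf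
    match stack with
    | [] => simp [crunchLoopF]
    | (i, a, u) :: rest =>
      simp only [crunchLoopF]
      split
      next ha =>
        subst ha
        rw [ih buckets rest (out ++ [u])
            (by have := crunchWts_cons_pos buckets (i, 0, u) rest
                simp only [crunchWts, List.foldr] at *
                have : 0 < crunchWt buckets i := by simp [crunchWt]
                omega)]
        have h0 : crunch buckets i 0 u = [u] := by rw [crunch]; simp [crunchF]
        simp [h0]
      next ha =>
        rw [ih buckets _ out (by
          have h1 := runF_wts (((buckets.length : Int) - crunchSkipF (((buckets.length : Int) - i).toNat + 1) buckets a i).toNat + 1)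
            buckets a u (crunchSkipF (((buckets.length : Int) - i).toNat + 1) buckets a i)
          have h2 : crunchWt buckets (crunchSkipF (((buckets.length : Int) - i).toNat + 1) buckets a i) ≤ crunchWt buckets i := by
            have := skipF_le (((buckets.length : Int) - i).toNat + 1) buckets a i
            simp only [crunchWt]
            exact Nat.pow_le_pow_right (by norm_num) (by omega)
          rw [crunchWts_append]
          simp only [crunchWts, List.foldr] at *
          omega)]
        rw [List.flatMap_append, ← List.append_assoc]
        rw [crunch_step buckets i a u ha]
        simp

-- ===== VERDICT (by name: the statement is the Claim_ definition above) =====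
theorem crunch_spec : Claim_equal_crunch := by
  intro buckets index alloted used _ _
  unfold Spec_crunch crunch_alt
  rw [crunchLoopF_eq _ buckets _ [] le_rfl]
  simp
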